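-- pv_equiv track=rewrite | github.com/simonebufalini/univ | algo2/esercizi/alternata.py | alternata
-- ===== SOURCE A (Python) =====
-- def alternata(X):
-- 	prec = X[0]
-- 	up = True
-- 	down = True
-- 	c = 1
-- 	for i in range(1, len(X)):
-- 		if X[i] > X[i-1] and up:
-- 			up = False
-- 			down = True
-- 			c = c+1
-- 		elif X[i] < X[i-1] and down:
-- 			down = False
-- 			up = True
-- 			c = c+1
-- 		prec = X[i]
--
-- 	return c
-- ===== SOURCE B (Python) =====
-- def alternata(X):
--     # Two-pass: the first element of X starts the sequence (count 1);
--     # then extract the nonzero adjacent movement signs and count sign runs.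
--     prec = X[0]
--     signs = [b > a for a, b in zip(X, X[1:]) if a != b]
--     transitions = sum(1 for prev, cur in zip([None] + signs, signs) if prev != cur)
--     return 1 + transitions
-- ===== Notes on version B (the rewrite author's own statement) =====
-- stated objective: alternative
-- what changed: Replaces A's single stateful greedy loop with two up/down flags by a two-pass decomposition: first extract the list of nonzero adjacent movement signs, then count maximal runs of equal signs (1 + number of sign transitions).
import Mathlib
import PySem

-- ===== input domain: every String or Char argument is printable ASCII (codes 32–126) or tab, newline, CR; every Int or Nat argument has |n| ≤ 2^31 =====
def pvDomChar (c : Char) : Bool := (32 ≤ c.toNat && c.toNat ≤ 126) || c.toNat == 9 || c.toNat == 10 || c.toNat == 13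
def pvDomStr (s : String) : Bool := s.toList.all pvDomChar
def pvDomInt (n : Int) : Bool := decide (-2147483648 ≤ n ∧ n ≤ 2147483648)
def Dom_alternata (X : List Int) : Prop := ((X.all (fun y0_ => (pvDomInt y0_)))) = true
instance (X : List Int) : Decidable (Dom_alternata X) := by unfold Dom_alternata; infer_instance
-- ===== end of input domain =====

-- B replaces A's greedy flag loop by a two-pass sign-extraction + run-count decomposition (alternative, same cost).

-- ===== PORT A =====
-- state = (up, down, c, prec); A's loop over range(1, len(X)) reading X[i-1], X[i]
def alternata (X : List Int) : Int :=
  match PySem.List.pyGet? X 0 with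
  | none => 0   -- unreachable under Pre_alternata (Python raises IndexError here)
  | some prec =>
    ((PySem.List.pyRange 1 (PySem.List.len X) 1).foldl
      (fun (s : Bool × Bool × Int × Int) (i : Int) =>
        if PySem.List.pyGetD X (i-1) 0 < PySem.List.pyGetD X i 0 ∧ s.1 = true then
          (false, true, s.2.2.1 + 1, PySem.List.pyGetD X i 0)
        else if PySem.List.pyGetD X i 0 < PySem.List.pyGetD X (i-1) 0 ∧ s.2.1 = true then
          (true, false, s.2.2.1 + 1, PySem.List.pyGetD X i 0)
        else (s.1, s.2.1, s.2.2.1, PySem.List.pyGetD X i 0))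
      (true, true, 1, prec)).2.2.1

-- ===== PORT B =====
-- B reads the first element first (the first element starts the sequence), so it too raises on [].
def alternata_alt (X : List Int) : Int :=
  match PySem.List.pyGet? X 0 with
  | none => 0   -- unreachable under Pre_alternata (Python raises IndexError here)
  | some _prec =>
    let signs : List Bool :=
      (X.zip (PySem.List.slice X (some 1) none)).filterMap
        (fun p => if p.1 ≠ p.2 then some (decide (p.1 < p.2)) else none)
    let transitions : Nat :=
      ((((none : Option Bool) :: signs.map some).zip signs).filter
        (fun p => p.1 != some p.2)).length
    1 + (transitions : Int)

-- ===== PRECONDITION & SPEC =====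
-- A reads its first element before the loop, so it raises IndexError on the empty list; Pre_ excludes only that (B raises there too).
def Pre_alternata (X : List Int) : Prop := X ≠ []
instance (X : List Int) : Decidable (Pre_alternata X) := by unfold Pre_alternata; infer_instance
def pvWitness_alternata : List Int := [1, 2, 0]

def Spec_alternata (X : List Int) (out : Int) : Prop := out = alternata_alt X
instance (X : List Int) (out : Int) : Decidable (Spec_alternata X out) := by unfold Spec_alternata; infer_instance

-- ===== CLAIM (what is proved, stated in full; the proofs are below) =====
def Claim_equal_alternata : Prop := ∀ (X : List Int), Dom_alternata X → Pre_alternata X → Spec_alternata X (alternata X)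

-- ===== LEMMAS AND PROOFS =====

-- A's loop body, as a function of the pair (X[i-1], X[i])
def pairStep (s : Bool × Bool × Int × Int) (p : Int × Int) : Bool × Bool × Int × Int :=
  if p.1 < p.2 ∧ s.1 = true then (false, true, s.2.2.1 + 1, p.2)
  else if p.2 < p.1 ∧ s.2.1 = true then (true, false, s.2.2.1 + 1, p.2)
  else (s.1, s.2.1, s.2.2.1, p.2)

def pairFn (X : List Int) (i : Int) : Int × Int :=
  (PySem.List.pyGetD X (i-1) 0, PySem.List.pyGetD X i 0)

-- the movement signs of a list of adjacent pairs (true = up), equal pairs skipped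
def signsOf (P : List (Int × Int)) : List Bool :=
  P.filterMap (fun p => if p.1 ≠ p.2 then some (decide (p.1 < p.2)) else none)

-- counts signs that differ from the previous sign (chained), i.e. number of runs
def cnt (last : Option Bool) : List Bool → Nat
  | [] => 0
  | s :: rest => (if some s ≠ last then 1 else 0) + cnt (some s) rest

-- A's flags are determined by the last counted sign
def upOf : Option Bool → Bool
  | some true => false
  | _ => true
def downOf : Option Bool → Bool
  | some false => false
  | _ => true

lemma cntA (P : List (Int × Int)) : ∀ (last : Option Bool) (c prec : Int),
    (P.foldl pairStep (upOf last, downOf last, c, prec)).2.2.1 = c + (cnt last (signsOf P) : Nat) := by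
  induction P with
  | nil => intro last c prec; simp [signsOf, cnt]
  | cons p rest ih =>
    intro last c prec
    rcases lt_trichotomy p.1 p.2 with hlt | heq | hgt
    · have hstep : ∀ s : Bool × Bool × Int × Int, s.1 = true →
          pairStep s p = (false, true, s.2.2.1 + 1, p.2) := by
        intro s hs; simp [pairStep, hlt, hs]
      have hstep' : ∀ s : Bool × Bool × Int × Int, s.1 = false → s.2.1 = true →
          pairStep s p = (s.1, s.2.1, s.2.2.1, p.2) := by
        intro s hs hd; simp [pairStep, hlt, hs, not_lt.mpr hlt.le]
      have hsig : signsOf (p :: rest) = true :: signsOf rest := by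
        simp [signsOf, hlt.ne, hlt]
      rcases last with _ | b
      · have h' := ih (some true) (c+1) p.2
        simp only [upOf, downOf] at h'
        simp [upOf, downOf, hstep, hsig, cnt, h']; ring
      · cases b
        · have h' := ih (some true) (c+1) p.2
          simp only [upOf, downOf] at h'
          simp [upOf, downOf, hstep, hsig, cnt, h']; ring
        · have h' := ih (some true) c p.2
          simp only [upOf, downOf] at h'
          simp [upOf, downOf, hstep', hsig, cnt, h']
    · have hstep : ∀ s : Bool × Bool × Int × Int,
          pairStep s p = (s.1, s.2.1, s.2.2.1, p.2) := by
        intro s; simp [pairStep, heq]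
      have hsig : signsOf (p :: rest) = signsOf rest := by
        simp [signsOf, heq]
      rcases last with _ | b
      · have h' := ih none c p.2
        simp only [upOf, downOf] at h'
        simp [upOf, downOf, hstep, hsig, h']
      · cases b
        · have h' := ih (some false) c p.2
          simp only [upOf, downOf] at h'
          simp [upOf, downOf, hstep, hsig, h']
        · have h' := ih (some true) c p.2
          simp only [upOf, downOf] at h'
          simp [upOf, downOf, hstep, hsig, h']
    · have hstep : ∀ s : Bool × Bool × Int × Int, s.2.1 = true →
          pairStep s p = (true, false, s.2.2.1 + 1, p.2) := by
        intro s hd; simp [pairStep, hgt, not_lt.mpr hgt.le, hd]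
      have hstep' : ∀ s : Bool × Bool × Int × Int, s.1 = true → s.2.1 = false →
          pairStep s p = (s.1, s.2.1, s.2.2.1, p.2) := by
        intro s hs hd; simp [pairStep, hgt, not_lt.mpr hgt.le, hd]
      have hsig : signsOf (p :: rest) = false :: signsOf rest := by
        simp [signsOf, hgt.ne', not_lt.mpr hgt.le]
      rcases last with _ | b
      · have h' := ih (some false) (c+1) p.2
        simp only [upOf, downOf] at h'
        simp [upOf, downOf, hstep, hsig, cnt, h']; ring
      · cases b
        · have h' := ih (some false) c p.2
          simp only [upOf, downOf] at h'
          simp [upOf, downOf, hstep', hsig, cnt, h']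
        · have h' := ih (some false) (c+1) p.2
          simp only [upOf, downOf] at h'
          simp [upOf, downOf, hstep, hsig, cnt, h']; ring

lemma cntB (signs : List Bool) : ∀ (prev : Option Bool),
    (((prev :: signs.map some).zip signs).filter (fun p => p.1 != some p.2)).length
      = cnt prev signs := by
  induction signs with
  | nil => intro prev; simp [cnt]
  | cons s rest ih =>
    intro prev
    simp only [List.map_cons, List.zip_cons_cons, List.filter_cons, cnt]
    rw [← ih (some s)]
    by_cases h : prev = some s
    · simp [h]
    · have hb : (prev != some s) = true := by simpa [bne] using h
      simp [hb, Ne.symm h]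
      omega

lemma map_range_pairs (X : List Int) :
    (PySem.List.pyRange 1 (PySem.List.len X) 1).map (pairFn X) = X.zip X.tail := by
  apply List.ext_getElem
  · simp [PySem.List.length_pyRange_one, List.length_zip]
  · intro k h1 h2
    have hk : k < X.length - 1 := by
      simp [PySem.List.length_pyRange_one] at h1; omega
    have hkX : k < X.length := by omega
    have hk1 : k + 1 < X.length := by omega
    simp [PySem.List.getElem_pyRange_one, pairFn, List.getElem?_eq_getElem hkX]
    rw [show ((1:Int) + (k:Int)) = ((k+1 : Nat) : Int) by push_cast; ring,
      PySem.List.pyGetD_natCast]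
    exact List.getD_eq_getElem X 0 hk1

lemma alternata_eq_pairs (x : Int) (xs : List Int) :
    alternata (x :: xs) = (((x :: xs).zip xs).foldl pairStep (true, true, 1, x)).2.2.1 := by
  have h0 : PySem.List.pyGet? (x :: xs) 0 = some x := PySem.List.pyGet?_zero_cons x xs
  unfold alternata
  rw [h0]
  show ((PySem.List.pyRange 1 (PySem.List.len (x :: xs)) 1).foldl
      (fun s i => pairStep s (pairFn (x :: xs) i)) (true, true, 1, x)).2.2.1 = _
  conv_lhs => rw [← List.foldl_map (f := pairFn (x :: xs)) (g := pairStep)]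
  rw [map_range_pairs, List.tail_cons]

lemma alternata_alt_eq (x : Int) (xs : List Int) :
    alternata_alt (x :: xs) = 1 + (cnt none (signsOf ((x :: xs).zip xs)) : Nat) := by
  have h0 : PySem.List.pyGet? (x :: xs) 0 = some x := PySem.List.pyGet?_zero_cons x xs
  unfold alternata_alt
  rw [h0]
  show 1 + (((((none : Option Bool) :: _).zip _).filter _).length : Int) = _
  rw [PySem.List.slice_from_one, List.tail_cons]
  exact congrArg (fun n : Nat => 1 + (n : Int)) (cntB (signsOf ((x :: xs).zip xs)) none)

-- ===== VERDICT (by name: the statement is the Claim_ definition above) =====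
theorem alternata_spec : Claim_equal_alternata := by
  intro X _ hpre
  obtain ⟨x, xs, rfl⟩ := List.exists_cons_of_ne_nil hpre
  show alternata (x :: xs) = alternata_alt (x :: xs)
  rw [alternata_eq_pairs, alternata_alt_eq]
  have h := cntA ((x :: xs).zip xs) none 1 x
  simp only [upOf, downOf] at h
  rw [h]
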